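-- pv_equiv track=rewrite | github.com/michael-cannon/upgraded-broccoli | app.py | convert_alternate_headers
-- ===== SOURCE A (Python) =====
-- def convert_alternate_headers(markdown_content):
--     lines = markdown_content.split('\n')
--     converted_lines = []
--
--     i = 0
--     while i < len(lines):
--         line = lines[i]
--         if i + 1 < len(lines) and (lines[i + 1].startswith('=====') or lines[i + 1].startswith('-----')):
--             if lines[i + 1].startswith('====='):
--                 converted_lines.append(f"# {line}")
--                 i += 2  # Skip the next line
--             elif lines[i + 1].startswith('-----'):
--                 converted_lines.append(f"## {line}")
--                 i += 2  # Skip the next line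
--             else:
--                 converted_lines.append(line)
--                 i += 1
--         else:
--             converted_lines.append(line)
--             i += 1
--
--     return '\n'.join(converted_lines)
-- ===== SOURCE B (Python) =====
-- def convert_alternate_headers(markdown_content):
--     result = []
--     prev_consumed = False
--     for line in markdown_content.split('\n'):
--         if not prev_consumed and result and line.startswith('====='):
--             result[-1] = f"# {result[-1]}"
--             prev_consumed = True
--         elif not prev_consumed and result and line.startswith('-----'):
--             result[-1] = f"## {result[-1]}"
--             prev_consumed = True
--         else:
--             result.append(line)
--             prev_consumed = False
--     return '\n'.join(result)
-- ===== Notes on version B (the rewrite author's own statement) =====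
-- stated objective: alternative
-- what changed: Replaces A's index-based look-ahead loop (peek at lines[i+1], emit header, skip two) with a single look-behind pass that appends each line and, on seeing an underline, rewrites the previously emitted line in place using a prev_consumed flag.
import Mathlib
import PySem

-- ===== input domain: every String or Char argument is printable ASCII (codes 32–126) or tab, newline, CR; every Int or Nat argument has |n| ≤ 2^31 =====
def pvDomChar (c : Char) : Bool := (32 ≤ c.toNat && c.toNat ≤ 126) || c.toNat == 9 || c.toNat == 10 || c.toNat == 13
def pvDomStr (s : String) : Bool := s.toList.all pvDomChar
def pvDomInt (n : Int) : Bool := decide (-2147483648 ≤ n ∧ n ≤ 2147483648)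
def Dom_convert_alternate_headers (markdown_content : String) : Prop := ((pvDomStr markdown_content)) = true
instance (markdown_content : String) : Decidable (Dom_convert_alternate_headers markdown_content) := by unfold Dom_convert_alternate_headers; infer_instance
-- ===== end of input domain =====

-- B replaces A's look-ahead loop (peek at lines[i+1] and skip two) with a single look-behind
-- pass that rewrites the previously emitted line when an underline is seen (objective: alternative).

-- ===== PORT A =====
-- while loop over index i, transcribed as recursion on the remaining suffix of `lines`
-- (i + 1 < len(lines) ↔ the suffix has a second element)
def aLoop : List String → List String
  | [] => []
  | line :: [] => [line]                                -- i+1 < len fails: append line, i += 1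
  | line :: next :: rest =>
    if PySem.Str.startswith next "=====" || PySem.Str.startswith next "-----" then
      if PySem.Str.startswith next "=====" then
        ("# " ++ line) :: aLoop rest                    -- append f"# {line}", i += 2
      else if PySem.Str.startswith next "-----" then
        ("## " ++ line) :: aLoop rest                   -- append f"## {line}", i += 2
      else
        line :: aLoop (next :: rest)                    -- (unreachable else kept from A)
    else
      line :: aLoop (next :: rest)                      -- append line, i += 1

def convert_alternate_headers (markdown_content : String) : String :=
  PySem.Str.join "\n" (aLoop ((PySem.Str.split? markdown_content "\n").getD []))

-- ===== PORT B =====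
-- one forward pass; `result[-1] = f"# {result[-1]}"` is dropLast ++ [“# ” ++ getLast!]
def bStep (st : List String × Bool) (line : String) : List String × Bool :=
  if st.2 = false ∧ st.1 ≠ [] ∧ PySem.Str.startswith line "=====" = true then
    (st.1.dropLast ++ ["# " ++ st.1.getLast!], true)
  else if st.2 = false ∧ st.1 ≠ [] ∧ PySem.Str.startswith line "-----" = true then
    (st.1.dropLast ++ ["## " ++ st.1.getLast!], true)
  else
    (st.1 ++ [line], false)

def convert_alternate_headers_alt (markdown_content : String) : String :=
  PySem.Str.join "\n" ((((PySem.Str.split? markdown_content "\n").getD []).foldl bStep ([], false)).1)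

-- ===== PRECONDITION & SPEC =====
def Spec_convert_alternate_headers (markdown_content : String) (out : String) : Prop := out = convert_alternate_headers_alt markdown_content
instance (markdown_content : String) (out : String) : Decidable (Spec_convert_alternate_headers markdown_content out) := by unfold Spec_convert_alternate_headers; infer_instance

-- ===== CLAIM (what is proved, stated in full; the proofs are below) =====
def Claim_equal_convert_alternate_headers : Prop := ∀ (markdown_content : String), Dom_convert_alternate_headers markdown_content → Spec_convert_alternate_headers markdown_content (convert_alternate_headers markdown_content)

-- ===== LEMMAS AND PROOFS =====

theorem key_invariant (ls : List String) :
    (∀ x acc, ((ls.foldl bStep (acc ++ [x], false)).1) = acc ++ aLoop (x :: ls)) ∧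
    (∀ acc, ((ls.foldl bStep (acc, true)).1) = acc ++ aLoop ls) := by
  induction ls with
  | nil => exact ⟨fun x acc => by simp [aLoop], fun acc => by simp [aLoop]⟩
  | cons l rest ih =>
    refine ⟨fun x acc => ?_, fun acc => ?_⟩
    · by_cases hE : PySem.Chars.startswith l.toList ['=','=','=','=','='] = true
      · have hstep : bStep (acc ++ [x], false) l = (acc ++ ["# " ++ x], true) := by
          simp [bStep, hE]
        rw [List.foldl_cons, hstep, ih.2]
        simp [aLoop, hE]
      · by_cases hD : PySem.Chars.startswith l.toList ['-','-','-','-','-'] = true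
        · have hstep : bStep (acc ++ [x], false) l = (acc ++ ["## " ++ x], true) := by
            simp [bStep, hE, hD]
          rw [List.foldl_cons, hstep, ih.2]
          simp [aLoop, hE, hD]
        · have hstep : bStep (acc ++ [x], false) l = ((acc ++ [x]) ++ [l], false) := by
            simp [bStep, hE, hD]
          rw [List.foldl_cons, hstep, ih.1 l (acc ++ [x])]
          simp [aLoop, hE, hD]
    · have hstep : bStep (acc, true) l = (acc ++ [l], false) := by
        simp [bStep]
      rw [List.foldl_cons, hstep, ih.1 l acc]

theorem fold_eq_aLoop (ls : List String) : ((ls.foldl bStep ([], false)).1) = aLoop ls := by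
  cases ls with
  | nil => rfl
  | cons l rest =>
    have hstep : bStep ([], false) l = (([] : List String) ++ [l], false) := by
      simp [bStep]
    rw [List.foldl_cons, hstep, (key_invariant rest).1 l []]
    simp

-- ===== VERDICT (by name: the statement is the Claim_ definition above) =====
theorem convert_alternate_headers_spec : Claim_equal_convert_alternate_headers := by
  intro md _
  unfold Spec_convert_alternate_headers convert_alternate_headers convert_alternate_headers_alt
  rw [fold_eq_aLoop]
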